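-- pv_equiv track=rewrite | github.com/AustinHasten/AnkiRandomFont | utils.py | listsToSet
-- ===== SOURCE A (Python) =====
-- def listsToSet(lists, logic):
--     ''' Take a list of lists and return a set that is either the intersection or the union of that. '''
--     r = set([item for sublist in lists for item in sublist])  # set(Flatten list of lists)
--     if logic == 'or':
--         return r
--     elif logic == 'and':
--         return r.intersection(*lists)
--     else:
--         raise Exception('Invalid logic option')
-- ===== SOURCE B (Python) =====
-- def listsToSet(lists, logic):
--     ''' Take a list of lists and return a set that is either the intersection or the union of that. '''
--     if logic == 'or':
--         return {item for sublist in lists for item in sublist}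
--     elif logic == 'and':
--         count = {}
--         for sublist in lists:
--             for item in dict.fromkeys(sublist):
--                 count[item] = count.get(item, 0) + 1
--         return {item for item, c in count.items() if c == len(lists)}
--     else:
--         raise Exception('Invalid logic option')
-- ===== Notes on version B (the rewrite author's own statement) =====
-- stated objective: alternative
-- what changed: The 'and' branch no longer calls set.intersection on the flattened set: B makes one counting pass, incrementing a dict entry once per distinct element of each sublist, and keeps the elements whose count equals len(lists).
import Mathlib
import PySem

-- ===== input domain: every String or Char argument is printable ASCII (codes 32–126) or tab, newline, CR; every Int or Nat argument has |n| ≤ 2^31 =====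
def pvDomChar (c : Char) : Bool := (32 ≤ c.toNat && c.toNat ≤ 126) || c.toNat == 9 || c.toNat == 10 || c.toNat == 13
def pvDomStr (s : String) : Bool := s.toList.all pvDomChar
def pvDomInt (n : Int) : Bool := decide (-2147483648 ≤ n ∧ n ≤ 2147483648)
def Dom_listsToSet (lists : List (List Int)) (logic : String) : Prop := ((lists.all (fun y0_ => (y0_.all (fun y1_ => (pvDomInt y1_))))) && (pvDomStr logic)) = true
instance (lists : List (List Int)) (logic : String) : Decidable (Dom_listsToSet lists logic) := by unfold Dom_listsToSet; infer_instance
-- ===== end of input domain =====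

-- B replaces the 'and' branch's set.intersection with a single counting pass over a dict
-- (one increment per distinct element of each sublist, keep counts equal to len(lists)).

-- ===== PORT A =====
-- r = set([item for sublist in lists for item in sublist]); 'and' → r.intersection(*lists)
def listsToSet (lists : List (List Int)) (logic : String) : List Int :=
  let r : PySem.Set Int := PySem.Set.ofList (lists.flatMap (fun sublist => sublist.map (fun item => item)))
  if logic == "or" then r
  else if logic == "and" then lists.foldl (fun s sublist => PySem.Set.inter s sublist) r
  else []  -- raise Exception('Invalid logic option'): excluded by Pre_listsToSet

-- ===== PORT B =====
def listsToSet_alt (lists : List (List Int)) (logic : String) : List Int :=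
  if logic == "or" then PySem.Set.ofList (lists.flatMap (fun sublist => sublist))
  else if logic == "and" then
    -- count[item] = count.get(item, 0) + 1, once per distinct item of each sublist
    let count : PySem.Dict Int Int :=
      lists.foldl (fun d sublist =>
        (PySem.List.dedup sublist).foldl (fun d item => d.insert item (d.getD item 0 + 1)) d)
        PySem.Dict.empty
    PySem.Set.ofList ((count.items.filter (fun p => p.2 == (lists.length : Int))).map (fun p => p.1))
  else []  -- raise Exception('Invalid logic option'): excluded by Pre_listsToSet

-- ===== PRECONDITION & SPEC =====
-- A raises Exception('Invalid logic option') for any logic other than 'or'/'and'; exactly those inputs are excluded.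
def Pre_listsToSet (lists : List (List Int)) (logic : String) : Prop := logic = "or" ∨ logic = "and"
instance (lists : List (List Int)) (logic : String) : Decidable (Pre_listsToSet lists logic) := by unfold Pre_listsToSet; infer_instance
def pvWitness_listsToSet : List (List Int) × String := ([[1, 2, 2], [2, 3]], "and")

def Spec_listsToSet (lists : List (List Int)) (logic : String) (out : List Int) : Prop := out = listsToSet_alt lists logic
instance (lists : List (List Int)) (logic : String) (out : List Int) : Decidable (Spec_listsToSet lists logic out) := by unfold Spec_listsToSet; infer_instance

-- ===== CLAIM (what is proved, stated in full; the proofs are below) =====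
def Claim_equal_listsToSet : Prop := ∀ (lists : List (List Int)) (logic : String), Dom_listsToSet lists logic → Pre_listsToSet lists logic → Spec_listsToSet lists logic (listsToSet lists logic)

-- ===== LEMMAS AND PROOFS =====

-- A's repeated intersection is a single filter over the start set.
theorem foldl_inter_eq_filter (lists : List (List Int)) (r : List Int) :
    lists.foldl (fun s sublist => PySem.Set.inter s sublist) r
      = r.filter (fun x => lists.all (fun sublist => sublist.contains x)) := by
  induction lists generalizing r with
  | nil => simp
  | cons a rest ih =>
      show rest.foldl _ (PySem.Set.inter r a) = _
      rw [ih]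
      show (r.filter fun x => a.contains x).filter _ = _
      rw [List.filter_filter]
      apply List.filter_congr
      intro x _
      simp [Bool.and_comm]

-- deduplicating each block before flattening does not change set(flatten)
theorem update_dedup (s : PySem.Set Int) (xs : List Int) :
    PySem.Set.update s (PySem.List.dedup xs) = PySem.Set.update s xs := by
  rw [PySem.Set.update_eq_append_filter, PySem.Set.update_eq_append_filter,
      PySem.List.dedup_eq_ofList, PySem.Set.ofList_ofList]

theorem update_flatMap_dedup (lists : List (List Int)) (s : PySem.Set Int) :
    PySem.Set.update s (lists.flatMap (fun sublist => PySem.List.dedup sublist))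
      = PySem.Set.update s (lists.flatMap (fun sublist => sublist)) := by
  induction lists generalizing s with
  | nil => rfl
  | cons a rest ih =>
      simp only [List.flatMap_cons, PySem.Set.update_append, update_dedup, ih]

-- how often a distinct-per-block flatten counts k = in how many blocks k occurs
theorem count_flatMap_dedup (k : Int) (lists : List (List Int)) :
    (lists.flatMap (fun sublist => PySem.List.dedup sublist)).count k
      = lists.countP (fun sublist => sublist.contains k) := by
  induction lists with
  | nil => rfl
  | cons a rest ih =>
      rw [List.flatMap_cons, List.count_append, List.countP_cons, ih]
      by_cases h : k ∈ a
      · rw [List.count_eq_one_of_mem (by simp [PySem.List.dedup_eq_ofList, PySem.Set.nodup_ofList])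
              (by simp [PySem.List.dedup_eq_ofList, PySem.Set.mem_ofList, h])]
        simp [h]
        omega
      · rw [List.count_eq_zero_of_not_mem (by simp [PySem.List.dedup_eq_ofList, PySem.Set.mem_ofList, h])]
        simp [h]

theorem countP_eq_length_iff_all (lists : List (List Int)) (k : Int) :
    (decide (lists.countP (fun sublist => sublist.contains k) = lists.length))
      = lists.all (fun sublist => sublist.contains k) := by
  by_cases h : ∀ sublist ∈ lists, sublist.contains k
  · rw [List.all_eq_true.mpr h, decide_eq_true (List.countP_eq_length.mpr h)]
  · have hc : ¬ lists.countP (fun sublist => sublist.contains k) = lists.length :=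
      fun hc => h (List.countP_eq_length.mp hc)
    have ha : lists.all (fun sublist => sublist.contains k) = false := by
      rw [List.all_eq_false]
      rcases not_forall.mp h with ⟨x, hx⟩
      rcases Classical.not_imp.mp hx with ⟨hmem, hnc⟩
      exact ⟨x, hmem, by simpa using hnc⟩
    rw [ha, decide_eq_false hc]

theorem listsToSet_and_eq (lists : List (List Int)) :
    listsToSet lists "and" = listsToSet_alt lists "and" := by
  show lists.foldl _ (PySem.Set.ofList _) = _
  rw [foldl_inter_eq_filter]
  show _ = PySem.Set.ofList ((PySem.Dict.items _).filter _ |>.map _)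
  have hbody : (fun (d : PySem.Dict Int Int) (item : Int) => d.insert item (d.getD item 0 + 1))
      = fun d item => d.modify item 0 (· + 1) := by
    funext d item; simp [PySem.Dict.modify]
  rw [hbody]
  rw [show (lists.foldl (fun d sublist =>
        (PySem.List.dedup sublist).foldl (fun d item => d.modify item 0 (· + 1)) d)
        PySem.Dict.empty)
      = PySem.Dict.counter (lists.flatMap (fun sublist => PySem.List.dedup sublist)) from by
    rw [PySem.Dict.counter_eq_foldl, List.foldl_flatMap]]
  rw [PySem.Dict.items_counter, List.filter_map, List.map_map]
  have hmapid : ((fun (p : Int × Int) => p.1) ∘ fun k =>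
      (k, ((lists.flatMap (fun sublist => PySem.List.dedup sublist)).count k : Int))) = id := by
    funext k; rfl
  rw [hmapid, List.map_id]
  have hpred : ∀ k : Int,
      ((fun (p : Int × Int) => p.2 == (lists.length : Int)) ∘ fun k =>
        (k, ((lists.flatMap (fun sublist => PySem.List.dedup sublist)).count k : Int))) k
      = lists.all (fun sublist => sublist.contains k) := by
    intro k
    show decide (((lists.flatMap (fun sublist => PySem.List.dedup sublist)).count k : Int)
            = (lists.length : Int)) = _
    rw [decide_eq_decide.mpr Int.natCast_inj]
    simp only [count_flatMap_dedup]
    exact countP_eq_length_iff_all lists k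
    exact inferInstance
  rw [List.filter_congr (fun k _ => hpred k)]
  have hof : PySem.Set.ofList (lists.flatMap (fun sublist => PySem.List.dedup sublist))
      = PySem.Set.ofList (lists.flatMap (fun sublist => sublist.map (fun item => item))) := by
    rw [← PySem.Set.update_nil_left, ← PySem.Set.update_nil_left, update_flatMap_dedup]
    simp
  rw [hof]
  exact Eq.symm (PySem.Set.ofList_eq_self_of_nodup _
    (List.Nodup.filter _ (PySem.Set.nodup_ofList _)))

-- ===== VERDICT (by name: the statement is the Claim_ definition above) =====
theorem listsToSet_spec : Claim_equal_listsToSet := by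
  intro lists logic _ hpre
  show listsToSet lists logic = listsToSet_alt lists logic
  rcases hpre with h | h
  · subst h
    simp [listsToSet, listsToSet_alt]
  · subst h
    exact listsToSet_and_eq lists
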